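-- pv_equiv track=rewrite | github.com/casys-kaist/protein-design-pipelines | profiling/src/profile/components/prep_mmseqs_batch.py | _materialize_batch
-- ===== SOURCE A (Python) =====
-- from typing import List, Tuple
--
-- def _unique_name(base: str, seen: set[str]) -> str:
--     candidate = base
--     suffix = 1
--     while candidate in seen:
--         candidate = f"{base}_rep{suffix}"
--         suffix += 1
--     seen.add(candidate)
--     return candidate
--
-- def _materialize_batch(records: List[Tuple[str, str]], count: int) -> List[Tuple[str, str]]:
--     if not records:
--         raise ValueError("Source FASTA contained no sequences.")
--     target_count = max(1, int(count))
--     seen: set[str] = set()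
--     batched: List[Tuple[str, str]] = []
--
--     for idx in range(target_count):
--         header, seq = records[idx % len(records)]
--         base_name = header if idx < len(records) else f"{header}_tile{idx // len(records)}"
--         name = _unique_name(base_name, seen)
--         batched.append((name, seq))
--     return batched
-- ===== SOURCE B (Python) =====
-- from typing import List, Tuple
--
-- def _materialize_batch(records: List[Tuple[str, str]], count: int) -> List[Tuple[str, str]]:
--     if not records:
--         raise ValueError("Source FASTA contained no sequences.")
--     target_count = max(1, int(count))
--     # Pass 1: lay out whole tiles of (base_name, seq) pairs, then cut to the target length.
--     tiles = -(-target_count // len(records))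
--     batch: List[Tuple[str, str]] = list(records)
--     batch.extend(
--         (header + "_tile" + str(tile), seq)
--         for tile in range(1, tiles)
--         for header, seq in records
--     )
--     del batch[target_count:]
--     # Pass 2: resolve name collisions with _rep suffixes, rewriting entries in place.
--     seen: set[str] = set()
--     for i, (base, seq) in enumerate(batch):
--         name = base
--         rep = 1
--         while name in seen:
--             name = f"{base}_rep{rep}"
--             rep += 1
--         seen.add(name)
--         if name is not base:
--             batch[i] = (name, seq)
--     return batch
-- ===== Notes on version B (the rewrite author's own statement) =====
-- stated objective: alternative
-- what changed: A fuses generation and naming into one indexed loop over range(target) computing modulo/floordiv and the tile suffix per index; B first lays out the batch as whole tiles (records verbatim, then a flattened tile>=1 generator) cut to the target length, and then resolves _rep name collisions in a separate second pass that rewrites entries in place.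
import Mathlib
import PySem

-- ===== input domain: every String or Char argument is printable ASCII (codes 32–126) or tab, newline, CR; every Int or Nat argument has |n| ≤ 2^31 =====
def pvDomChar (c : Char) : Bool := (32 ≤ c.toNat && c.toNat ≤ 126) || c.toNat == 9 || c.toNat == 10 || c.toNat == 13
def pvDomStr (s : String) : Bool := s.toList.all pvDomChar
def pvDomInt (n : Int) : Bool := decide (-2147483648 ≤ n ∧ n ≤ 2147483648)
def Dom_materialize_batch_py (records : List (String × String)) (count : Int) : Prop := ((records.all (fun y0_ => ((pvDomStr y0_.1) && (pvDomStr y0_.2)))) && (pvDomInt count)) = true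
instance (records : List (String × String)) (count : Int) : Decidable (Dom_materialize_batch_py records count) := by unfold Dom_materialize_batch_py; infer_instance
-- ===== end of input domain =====

-- B splits A's fused loop into two passes: lay out whole tiles of base names and cut to the
-- target, then resolve _rep collisions in a second pass (objective: alternative decomposition).
-- Pre_ excludes records = [], where A raises ValueError (B raises too).

-- ===== PORT A =====
-- Python's `while candidate in seen` loop, with fuel |seen|+1 (always enough: the candidate
-- strings are pairwise distinct, so one of the first |seen|+1 is outside seen).
def uniqLoopA (base : String) (seen : PySem.Set String) (candidate : String) (suffix : Int) : Nat → String
  | 0 => candidate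
  | fuel + 1 =>
      if candidate ∈ seen then
        uniqLoopA base seen (base ++ "_rep" ++ PySem.Int.toStr suffix) (suffix + 1) fuel
      else candidate

def unique_name_py (base : String) (seen : PySem.Set String) : String :=
  uniqLoopA base seen base 1 (seen.length + 1)

def materialize_batch_py (records : List (String × String)) (count : Int) : List (String × String) :=
  if records = [] then []  -- Python raises ValueError here (excluded by Pre_)
  else
    let target : Int := max 1 count
    let n : Int := (records.length : Int)
    ((PySem.List.pyRange 0 target 1).foldl
      (fun (st : PySem.Set String × List (String × String)) idx =>
        let hs := PySem.List.pyGetD records (PySem.Int.mod idx n) ("", "")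
        let base := if idx < n then hs.1
                    else hs.1 ++ "_tile" ++ PySem.Int.toStr (PySem.Int.floordiv idx n)
        let name := unique_name_py base st.1
        (PySem.Set.add st.1 name, st.2 ++ [(name, hs.2)]))
      (([] : PySem.Set String), [])).2

-- ===== PORT B =====
-- B's inlined `while name in seen` loop (same fuel convention as A's helper).
def uniqLoopB (base : String) (seen : PySem.Set String) (name : String) (suffix : Int) : Nat → String
  | 0 => name
  | fuel + 1 =>
      if name ∈ seen then
        uniqLoopB base seen (base ++ "_rep" ++ PySem.Int.toStr suffix) (suffix + 1) fuel
      else name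

def materialize_batch_py_alt (records : List (String × String)) (count : Int) : List (String × String) :=
  if records = [] then []  -- Python raises ValueError here (excluded by Pre_)
  else
    let target : Int := max 1 count
    let tiles : Int := -(PySem.Int.floordiv (-target) (records.length : Int))
    -- batch = list(records); batch.extend((header + "_tile" + str(tile), seq) for tile in range(1, tiles) for header, seq in records)
    let cand0 := records ++ (PySem.List.pyRange 1 tiles 1).foldl
      (fun acc tile =>
        acc ++ records.map (fun hs => (hs.1 ++ "_tile" ++ PySem.Int.toStr tile, hs.2)))
      []
    let batch := PySem.List.slice cand0 none (some target)  -- del batch[target_count:]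
    ((PySem.List.pyRange 0 (batch.length : Int) 1).foldl
      (fun (st : List (String × String) × PySem.Set String) i =>
        let bs := PySem.List.pyGetD st.1 i ("", "")
        let name := uniqLoopB bs.1 st.2 bs.1 1 (st.2.length + 1)
        (if name = bs.1 then st.1 else PySem.List.pySetD st.1 i (name, bs.2), PySem.Set.add st.2 name))
      (batch, ([] : PySem.Set String))).1

-- ===== PRECONDITION & SPEC =====
-- Pre_ excludes only records = [], on which the Python A raises ValueError.
def Pre_materialize_batch_py (records : List (String × String)) (count : Int) : Prop :=
  records ≠ []
instance (records : List (String × String)) (count : Int) : Decidable (Pre_materialize_batch_py records count) := by unfold Pre_materialize_batch_py; infer_instance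

def pvWitness_materialize_batch_py : (List (String × String)) × Int := ([("seq1", "ACGT"), ("seq1", "GGTA")], 5)

def Spec_materialize_batch_py (records : List (String × String)) (count : Int) (out : List (String × String)) : Prop := out = materialize_batch_py_alt records count
instance (records : List (String × String)) (count : Int) (out : List (String × String)) : Decidable (Spec_materialize_batch_py records count out) := by unfold Spec_materialize_batch_py; infer_instance

-- ===== CLAIM (what is proved, stated in full; the proofs are below) =====
def Claim_equal_materialize_batch_py : Prop := ∀ (records : List (String × String)) (count : Int), Dom_materialize_batch_py records count → Pre_materialize_batch_py records count → Spec_materialize_batch_py records count (materialize_batch_py records count)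

-- ===== LEMMAS AND PROOFS =====

theorem uniqLoopB_eq_uniqLoopA (base : String) (seen : PySem.Set String) :
    ∀ (fuel : Nat) (c : String) (s : Int), uniqLoopB base seen c s fuel = uniqLoopA base seen c s fuel := by
  intro fuel
  induction fuel with
  | zero => intro c s; rfl
  | succ f ih =>
      intro c s
      simp only [uniqLoopA, uniqLoopB]
      split_ifs with h
      · exact ih _ _
      · rfl

-- common semantics of the collision-resolution pass, used only by the proofs
def goUniq : PySem.Set String → List (String × String) → List (String × String)
  | _, [] => []
  | s, x :: xs =>
      let name := unique_name_py x.1 s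
      (name, x.2) :: goUniq (PySem.Set.add s name) xs

theorem foldA_eq_goUniq (l : List (String × String)) : ∀ (s : PySem.Set String) (acc : List (String × String)),
    (l.foldl
      (fun (st : PySem.Set String × List (String × String)) x =>
        let name := unique_name_py x.1 st.1
        (PySem.Set.add st.1 name, st.2 ++ [(name, x.2)]))
      (s, acc)).2 = acc ++ goUniq s l := by
  induction l with
  | nil => intro s acc; simp [goUniq]
  | cons x xs ih =>
      intro s acc
      simp only [List.foldl_cons, goUniq, ih]
      simp

theorem foldB_eq_goUniq : ∀ (l pre : List (String × String)) (s : PySem.Set String),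
    ((PySem.List.pyRange (pre.length : Int) ((pre.length + l.length : Nat) : Int) 1).foldl
      (fun (st : List (String × String) × PySem.Set String) i =>
        let bs := PySem.List.pyGetD st.1 i ("", "")
        let name := uniqLoopB bs.1 st.2 bs.1 1 (st.2.length + 1)
        (if name = bs.1 then st.1 else PySem.List.pySetD st.1 i (name, bs.2), PySem.Set.add st.2 name))
      (pre ++ l, s)).1 = pre ++ goUniq s l := by
  intro l
  induction l with
  | nil =>
      intro pre s
      have hle : ((pre.length + ([] : List (String × String)).length : Nat) : Int) ≤ (pre.length : Int) := by simp
      rw [PySem.List.pyRange_one_eq_nil hle]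
      simp [goUniq]
  | cons x xs ih =>
      intro pre s
      obtain ⟨x1, x2⟩ := x
      have hlt : (pre.length : Int) < ((pre.length + ((x1, x2) :: xs).length : Nat) : Int) := by
        have h0 : 0 < ((x1, x2) :: xs).length := Nat.succ_pos _
        omega
      rw [PySem.List.pyRange_one_cons hlt]
      simp only [List.foldl_cons]
      have hget : PySem.List.pyGetD (pre ++ (x1, x2) :: xs) (pre.length : Int) ("", "") = (x1, x2) := by
        rw [PySem.List.pyGetD_natCast]
        simp [List.getD_eq_getElem?_getD]
      have hwrite : (if uniqLoopB x1 s x1 1 (s.length + 1) = x1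
            then pre ++ (x1, x2) :: xs
            else PySem.List.pySetD (pre ++ (x1, x2) :: xs) (pre.length : Int) ((uniqLoopB x1 s x1 1 (s.length + 1)), x2))
          = pre ++ ((uniqLoopB x1 s x1 1 (s.length + 1)), x2) :: xs := by
        split_ifs with h
        · rw [h]
        · rw [PySem.List.pySetD_natCast]; simp
      simp only [hget, hwrite]
      have harr1 : (pre.length : Int) + 1 = ((pre ++ [((uniqLoopB x1 s x1 1 (s.length + 1)), x2)]).length : Int) := by
        simp
      have harr2 : ((pre.length + ((x1, x2) :: xs).length : Nat) : Int) = (((pre ++ [((uniqLoopB x1 s x1 1 (s.length + 1)), x2)]).length + xs.length : Nat) : Int) := by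
        simp; push_cast; ring
      rw [harr1, harr2,
          show pre ++ ((uniqLoopB x1 s x1 1 (s.length + 1)), x2) :: xs
             = (pre ++ [((uniqLoopB x1 s x1 1 (s.length + 1)), x2)]) ++ xs by simp,
          ih]
      simp [goUniq, unique_name_py, uniqLoopB_eq_uniqLoopA]

theorem foldB_nil_eq_goUniq (l : List (String × String)) (s : PySem.Set String) :
    ((PySem.List.pyRange 0 (l.length : Int) 1).foldl
      (fun (st : List (String × String) × PySem.Set String) i =>
        let bs := PySem.List.pyGetD st.1 i ("", "")
        let name := uniqLoopB bs.1 st.2 bs.1 1 (st.2.length + 1)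
        (if name = bs.1 then st.1 else PySem.List.pySetD st.1 i (name, bs.2), PySem.Set.add st.2 name))
      (l, s)).1 = goUniq s l := by
  have h := foldB_eq_goUniq l [] s
  simp only [List.length_nil, Nat.zero_add, List.nil_append, Nat.cast_zero] at h
  exact h

-- map over a list written as a map over the index range (via getD)
theorem map_eq_range_getD {α β : Type} (h : α → β) (d : α) :
    ∀ (l : List α), l.map h = (List.range l.length).map (fun j => h (l.getD j d)) := by
  intro l
  induction l with
  | nil => rfl
  | cons x xs ih =>
      simp only [List.map, List.length_cons, List.range_succ_eq_map, List.map_map]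
      refine congrArg₂ _ rfl ?_
      rw [ih]
      apply List.map_congr_left
      intro j _
      rfl

-- the flattened tile layout is the index-range map of the per-index generator
theorem flatMap_tiles_eq {α β : Type} (g : Nat → α → β) (l : List α) (d : α) (hl : l ≠ []) :
    ∀ (tl : Nat),
      (List.range tl).flatMap (fun t => l.map (g t)) =
        (List.range (tl * l.length)).map (fun k => g (k / l.length) (l.getD (k % l.length) d)) := by
  intro tl
  have hn : 0 < l.length := List.length_pos_iff.mpr hl
  induction tl with
  | zero => simp
  | succ t ih =>
      rw [List.range_succ, List.flatMap_append, ih]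
      have hrange : List.range ((t + 1) * l.length) = List.range (t * l.length) ++ (List.range l.length).map (fun j => t * l.length + j) := by
        rw [Nat.succ_mul, List.range_add]
      rw [hrange, List.map_append, List.map_map]
      congr 1
      simp only [List.flatMap_cons, List.flatMap_nil, List.append_nil]
      rw [map_eq_range_getD (g t) d l]
      apply List.map_congr_left
      intro j hj
      have hj' : j < l.length := List.mem_range.mp hj
      have h1 : (t * l.length + j) / l.length = t := by
        rw [Nat.mul_comm, Nat.mul_add_div hn, Nat.div_eq_of_lt hj']
        omega
      have h2 : (t * l.length + j) % l.length = j := by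
        rw [Nat.mul_comm, Nat.mul_add_mod, Nat.mod_eq_of_lt hj']
      simp only [Function.comp, h1, h2]

-- ===== VERDICT (by name: the statement is the Claim_ definition above) =====
theorem materialize_batch_py_spec : Claim_equal_materialize_batch_py := by
  intro records count _ hpre
  unfold Spec_materialize_batch_py
  unfold materialize_batch_py materialize_batch_py_alt
  rw [if_neg hpre, if_neg hpre]
  dsimp only
  have hn : 0 < records.length := List.length_pos_iff.mpr hpre
  set target : Int := max 1 count with htarget
  have ht1 : 1 ≤ target := le_max_left _ _
  set T : Nat := target.toNat with hT
  have htT : target = (T : Int) := by omega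
  set n : Nat := records.length with hnn
  -- tiles is the ceiling of T / n
  obtain ⟨tl, r, h1, h2⟩ : ∃ tl r, T + n - 1 = (tl + 1) * n + r ∧ r < n := by
    refine ⟨(T + n - 1) / n - 1, (T + n - 1) % n, ?_, Nat.mod_lt _ hn⟩
    have hd := Nat.div_add_mod (T + n - 1) n
    rw [Nat.mul_comm] at hd
    have hdl : 1 ≤ (T + n - 1) / n := by
      rw [Nat.le_div_iff_mul_le hn]; omega
    have : ((T + n - 1) / n - 1 + 1) = (T + n - 1) / n := by omega
    rw [this]
    omega
  rw [Nat.succ_mul] at h1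
  have hT1 : 1 ≤ T := by omega
  have key1 : tl * n < T := by omega
  have key2 : T ≤ (tl + 1) * n := by rw [Nat.succ_mul]; omega
  have htiles : -(PySem.Int.floordiv (-target) ((n : Nat) : Int)) = ((tl + 1 : Nat) : Int) := by
    rw [PySem.Int.neg_floordiv_neg_eq_iff_of_pos (by exact_mod_cast hn)]
    rw [htT]
    constructor
    · have he : ((tl + 1 : Nat) : Int) - 1 = ((tl : Nat) : Int) := by push_cast; ring
      rw [he]
      exact_mod_cast key1
    · exact_mod_cast key2
  rw [htiles]
  set tln : Nat := tl + 1 with htln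
  -- the per-index generator of A's base names, over Nat
  set f : Nat → (String × String) := fun k =>
    ((if k < n then (records.getD (k % n) ("", "")).1
      else (records.getD (k % n) ("", "")).1 ++ "_tile" ++ PySem.Int.toStr ((k / n : Nat) : Int)),
     (records.getD (k % n) ("", "")).2) with hf
  -- and the per-tile generator of B's layout
  set g : Nat → (String × String) → (String × String) := fun t hs =>
    ((if t = 0 then hs.1 else hs.1 ++ "_tile" ++ PySem.Int.toStr ((t : Nat) : Int)), hs.2) with hg
  -- B's extend-loop over tiles 1..tiles-1, flattened
  have hB1 : (PySem.List.pyRange 1 ((tln : Nat) : Int) 1).foldl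
      (fun acc tile =>
        acc ++ records.map (fun hs => (hs.1 ++ "_tile" ++ PySem.Int.toStr tile, hs.2)))
      [] = (List.range tl).flatMap (fun k => records.map (g (k + 1))) := by
    rw [PySem.List.foldl_append_eq_flatMap]
    have hr1 : PySem.List.pyRange 1 ((tln : Nat) : Int) 1 = List.map (fun k : Nat => ((k + 1 : Nat) : Int)) (List.range tl) := by
      rw [PySem.List.pyRange_one]
      have : ((((tln : Nat) : Int) - 1).toNat) = tl := by rw [htln]; omega
      rw [this]
      apply List.map_congr_left
      intro k _
      push_cast
      ring
    rw [hr1, List.flatMap_map, hg]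
    simp only [List.nil_append]
    refine congrArg (fun F => List.flatMap F (List.range tl)) (funext fun k => ?_)
    refine congrArg (fun h => List.map h records) (funext fun hs => ?_)
    simp
  rw [hB1]
  -- stitch tile 0 (records itself) onto the flattened tiles, then index it
  have hcand : records ++ (List.range tl).flatMap (fun k => records.map (g (k + 1))) =
      (List.range (tln * n)).map f := by
    have h0 : records.map (g 0) = records := by
      rw [hg]
      simp
    have hpeel : (List.range tln).flatMap (fun t => records.map (g t)) =
        records.map (g 0) ++ (List.range tl).flatMap (fun k => records.map (g (k + 1))) := by
      rw [htln, List.range_succ_eq_map, List.flatMap_cons, List.flatMap_map]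
    have hpeel' : (List.range tln).flatMap (fun t => records.map (g t)) =
        records ++ (List.range tl).flatMap (fun k => records.map (g (k + 1))) := by
      rw [hpeel, h0]
    rw [← hpeel', flatMap_tiles_eq g records ("", "") hpre tln]
    apply List.map_congr_left
    intro k hk
    rw [hf, hg, ← hnn]
    by_cases hkn : k < n
    · have hq : k / n = 0 := Nat.div_eq_of_lt hkn
      simp [hkn, hq]
    · have hq : ¬ (k / n = 0) := by
        have h1 : 1 ≤ k / n := (Nat.le_div_iff_mul_le hn).mpr (by omega)
        omega
      simp [hkn, hq]
  rw [hcand]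
  -- slice to the first T candidates
  have hmin : min T (tln * n) = T := by omega
  have hslice : PySem.List.slice ((List.range (tln * n)).map f) none (some target) = (List.range T).map f := by
    rw [htT, PySem.List.slice_to_natCast, ← List.map_take, List.take_range, hmin]
  rw [hslice]
  -- B's second pass (in-place rewrite over indices) computes goUniq
  rw [foldB_nil_eq_goUniq ((List.range T).map f) []]
  -- A side: turn the index fold into a pair fold, then into goUniq
  have hpr : PySem.List.pyRange 0 ((T : Nat) : Int) 1 = List.map (fun k : Nat => (k : Int)) (List.range T) := by
    rw [PySem.List.pyRange_one]
    simp
  rw [htT, hpr, List.foldl_map]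
  rw [PySem.List.foldl_congr_mem (l := List.range T)
      (g := fun (st : PySem.Set String × List (String × String)) (k : Nat) =>
        let x := f k
        let name := unique_name_py x.1 st.1
        (PySem.Set.add st.1 name, st.2 ++ [(name, x.2)]))]
  · have hfold := (List.foldl_map (f := f)
        (g := fun (st : PySem.Set String × List (String × String)) (x : String × String) =>
          let name := unique_name_py x.1 st.1
          (PySem.Set.add st.1 name, st.2 ++ [(name, x.2)]))
        (l := List.range T) (init := (([] : PySem.Set String), ([] : List (String × String)))))
    exact ((congrArg Prod.snd hfold).symm).trans (foldA_eq_goUniq _ _ _)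
  · intro st k _
    simp only [hf]
    have hget : PySem.List.pyGetD records (PySem.Int.mod (k : Int) ((n : Nat) : Int)) ("", "") = records.getD (k % n) ("", "") := by
      rw [show PySem.Int.mod (k : Int) ((n : Nat) : Int) = ((k % n : Nat) : Int) from by exact_mod_cast PySem.Int.mod_natCast k n]
      exact PySem.List.pyGetD_natCast records _ _
    have hdiv : PySem.Int.floordiv (k : Int) ((n : Nat) : Int) = ((k / n : Nat) : Int) := by
      exact_mod_cast PySem.Int.floordiv_natCast k n
    simp only [hget, hdiv, ← hnn]
    by_cases hkn : k < n
    · simp [hkn]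
    · simp [hkn]
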